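-- pv_equiv track=rewrite | github.com/mnoorchenar/pizza-voice-ai | app.py | _pick
-- ===== SOURCE A (Python) =====
-- def _pick(val, catalogue, default_key):
--     if not val:
--         return catalogue[default_key]
--     v = val.lower().strip()
--     for k in sorted(catalogue, key=len, reverse=True):
--         if k in v or v in k:
--             return catalogue[k]
--     return catalogue[default_key]
-- ===== SOURCE B (Python) =====
-- def _pick(val, catalogue, default_key):
--     if not val:
--         return catalogue[default_key]
--     v = val.lower().strip()
--     matches = [k for k in catalogue if k in v or v in k]
--     if not matches:
--         return catalogue[default_key]
--     return catalogue[max(matches, key=len)]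
-- ===== Notes on version B (the rewrite author's own statement) =====
-- stated objective: simpler
-- what changed: Drops the length-descending sort of all keys: B filters the keys in catalogue order into matches and returns the entry for max(matches, key=len), whose first-maximum tie-break coincides with the stable reverse sort's early return.
import Mathlib
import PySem

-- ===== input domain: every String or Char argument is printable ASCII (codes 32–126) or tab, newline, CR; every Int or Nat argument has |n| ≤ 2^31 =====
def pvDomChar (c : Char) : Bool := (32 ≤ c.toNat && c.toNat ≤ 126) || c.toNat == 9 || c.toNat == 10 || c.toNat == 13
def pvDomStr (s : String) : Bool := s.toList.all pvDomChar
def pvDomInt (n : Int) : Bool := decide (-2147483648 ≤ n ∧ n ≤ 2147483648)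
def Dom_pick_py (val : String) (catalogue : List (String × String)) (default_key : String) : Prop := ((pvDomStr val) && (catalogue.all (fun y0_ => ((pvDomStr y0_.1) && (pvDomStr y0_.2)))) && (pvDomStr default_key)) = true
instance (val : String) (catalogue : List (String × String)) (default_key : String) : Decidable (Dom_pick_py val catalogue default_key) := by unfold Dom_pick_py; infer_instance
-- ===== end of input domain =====

-- ===== PORT A =====
-- B drops A's length-descending sort: it filters keys in catalogue order and takes the
-- running maximum by length (objective: simpler; return value only, no mutation involved).
-- Loop "for k in ...: if k in v or v in k: return catalogue[k]" of A.
def pickLoop (v : String) : List String → Option String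
  | [] => none
  | k :: rest =>
      if (PySem.Str.isIn k v || PySem.Str.isIn v k) = true then some k else pickLoop v rest

def pick_py (val : String) (catalogue : List (String × String)) (default_key : String) : String :=
  let d := PySem.Dict.ofList catalogue
  if val = "" then (d.get? default_key).getD ""       -- KeyError (= none) excluded by Pre_
  else
    let v := PySem.Str.strip (PySem.Str.lower val)
    match pickLoop v (PySem.List.sorted d.keys PySem.Str.len true) with
    | some k => (d.get? k).getD ""
    | none => (d.get? default_key).getD ""            -- KeyError (= none) excluded by Pre_

-- ===== PORT B =====
def pick_py_alt (val : String) (catalogue : List (String × String)) (default_key : String) : String :=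
  let d := PySem.Dict.ofList catalogue
  if val = "" then (d.get? default_key).getD ""       -- KeyError (= none) excluded by Pre_
  else
    let v := PySem.Str.strip (PySem.Str.lower val)
    let ms := d.keys.filter (fun k => PySem.Str.isIn k v || PySem.Str.isIn v k)
    if ms.isEmpty then (d.get? default_key).getD ""
    else
      match PySem.List.max? ms PySem.Str.len with  -- max(matches, key=len): FIRST maximum
      | some m => (d.get? m).getD ""
      | none => (d.get? default_key).getD ""            -- unreachable: matches is nonempty

-- ===== PRECONDITION & SPEC =====
-- Pre_ excludes exactly the inputs on which A raises KeyError: those where the default_key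
-- lookup is reached (empty val, or no key matching the normalised val) while default_key
-- is not a key of the catalogue.
def Pre_pick_py (val : String) (catalogue : List (String × String)) (default_key : String) : Prop :=
  (PySem.Dict.ofList catalogue).contains default_key = true ∨
  (val ≠ "" ∧ ∃ k ∈ (PySem.Dict.ofList catalogue).keys,
      (PySem.Str.isIn k (PySem.Str.strip (PySem.Str.lower val)) ||
       PySem.Str.isIn (PySem.Str.strip (PySem.Str.lower val)) k) = true)
instance (val : String) (catalogue : List (String × String)) (default_key : String) : Decidable (Pre_pick_py val catalogue default_key) := by unfold Pre_pick_py; infer_instance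

def pvWitness_pick_py : String × (List (String × String)) × String := ("pepperoni", [("pepperoni", "item-1"), ("margherita", "item-2")], "margherita")

def Spec_pick_py (val : String) (catalogue : List (String × String)) (default_key : String) (out : String) : Prop := out = pick_py_alt val catalogue default_key
instance (val : String) (catalogue : List (String × String)) (default_key : String) (out : String) : Decidable (Spec_pick_py val catalogue default_key out) := by unfold Spec_pick_py; infer_instance

-- ===== CLAIM (what is proved, stated in full; the proofs are below) =====
def Claim_equal_pick_py : Prop := ∀ (val : String) (catalogue : List (String × String)) (default_key : String), Dom_pick_py val catalogue default_key → Pre_pick_py val catalogue default_key → Spec_pick_py val catalogue default_key (pick_py val catalogue default_key)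

-- ===== LEMMAS AND PROOFS =====

theorem pickLoop_eq_find? (v : String) (l : List String) :
    pickLoop v l = l.find? (fun k => PySem.Str.isIn k v || PySem.Str.isIn v k) := by
  induction l with
  | nil => rfl
  | cons k rest ih =>
      simp only [pickLoop, List.find?_cons, ih]
      cases PySem.Str.isIn k v || PySem.Str.isIn v k <;> simp

theorem insertBy_eq_takeWhile_dropWhile {a : Type} (bef : a -> a -> Bool) (x : a) (L : List a) :
    PySem.List.insertBy bef x L
      = L.takeWhile (fun y => !bef x y) ++ x :: L.dropWhile (fun y => !bef x y) := by
  induction L with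
  | nil => rfl
  | cons y ys ih =>
      by_cases h : bef x y = true
      · simp [PySem.List.insertBy, h]
      · simp at h
        simp [PySem.List.insertBy, h, ih]

theorem max?_snoc {a k : Type} [LinearOrder k] (l : List a) (key : a -> k) (x : a) :
    PySem.List.max? (l ++ [x]) key
      = match PySem.List.max? l key with
        | none => some x
        | some m => if key m < key x then some x else some m := by
  show List.foldl _ none (l ++ [x]) = _
  rw [List.foldl_append]
  rfl

-- A's scan of the stable reverse sort returns exactly Python's max(filter, key):
-- the first element of maximal key among the ones in original order that satisfy P.
theorem find?_sorted_rev_eq_max?_filter {a k : Type} [LinearOrder k]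
    (xs : List a) (key : a -> k) (P : a -> Bool) :
    (PySem.List.sorted xs key true).find? P = PySem.List.max? (xs.filter P) key := by
  induction xs using List.reverseRecOn with
  | nil => rfl
  | append_singleton xs x ih =>
      have hpw := PySem.List.sorted_pairwise_rev xs key
      rw [PySem.List.sorted_rev_eq_foldl_insertBy] at *
      rw [List.foldl_append]
      set L := List.foldl (fun acc x => PySem.List.insertBy (fun a b => decide (key b < key a)) x acc) [] xs with hL
      simp only [List.foldl_cons, List.foldl_nil]
      rw [insertBy_eq_takeWhile_dropWhile, List.filter_append]
      set q : a -> Bool := fun y => !decide (key y < key x) with hq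
      have hTD : L = L.takeWhile q ++ L.dropWhile q := (List.takeWhile_append_dropWhile).symm
      have hT : ∀ y ∈ L.takeWhile q, key x ≤ key y := by
        intro y hy
        have := List.mem_takeWhile_imp hy
        simp [hq] at this; exact this
      have hD : ∀ y ∈ L.dropWhile q, key y < key x := by
        intro y hy
        rcases hd : L.dropWhile q with _ | ⟨d0, rest⟩
        · simp [hd] at hy
        · have h0 := List.head?_dropWhile_not q L
          rw [hd] at h0
          simp only [List.head?_cons] at h0
          have hd0' : key d0 < key x := by simpa [hq] using h0
          rw [hd, List.mem_cons] at hy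
          rcases hy with rfl | hy
          · exact hd0'
          · -- pairwise: everything after d0 has key ≤ key d0
            have hpw2 : (L.takeWhile q ++ L.dropWhile q).Pairwise (fun a b => key b ≤ key a) := hTD ▸ hpw
            have := (List.pairwise_append.mp hpw2).2.1
            rw [hd] at this
            exact lt_of_le_of_lt ((List.pairwise_cons.mp this).1 y hy) hd0'
      rw [List.find?_append]
      by_cases hPx : P x = true
      · rw [List.filter_cons_of_pos hPx, List.filter_nil, max?_snoc]
        have hx : List.find? P (x :: List.dropWhile q L) = some x := by
          rw [List.find?_cons, hPx]
        rcases hft : (List.takeWhile q L).find? P with _ | m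
        · simp only [Option.none_or, hx]
          rcases hfd : (List.dropWhile q L).find? P with _ | m'
          · have hnone : L.find? P = none := by rw [hTD, List.find?_append, hft, hfd]; rfl
            rw [ih] at hnone
            rw [hnone]
          · have hm' : L.find? P = some m' := by rw [hTD, List.find?_append, hft, hfd]; rfl
            rw [ih] at hm'
            rw [hm']
            have hlt : key m' < key x := hD m' (List.mem_of_find?_eq_some hfd)
            simp [hlt]
        · have hmL : L.find? P = some m := by rw [hTD, List.find?_append, hft]; rfl
          rw [ih] at hmL
          rw [hmL]
          have hle : key x ≤ key m := hT m (List.mem_of_find?_eq_some hft)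
          simp [not_lt.mpr hle]
      · have hPx' : P x = false := by simpa using hPx
        have hx : List.find? P (x :: List.dropWhile q L) = List.find? P (List.dropWhile q L) := by
          rw [List.find?_cons, hPx']
        rw [List.filter_cons_of_neg (by simp [hPx']), List.filter_nil, List.append_nil, hx,
          <- List.find?_append, <- hTD, ih]

theorem isEmpty_eq_false_of_max?_eq_some {a k : Type} [LT k] [DecidableLT k]
    {xs : List a} {key : a -> k} {m : a}
    (h : PySem.List.max? xs key = some m) : xs.isEmpty = false := by
  cases xs with
  | nil => simp [PySem.List.max?] at h
  | cons y ys => rfl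

-- ===== VERDICT (by name: the statement is the Claim_ definition above) =====
theorem pick_py_spec : Claim_equal_pick_py := by
  intro val catalogue default_key _ _
  unfold Spec_pick_py pick_py pick_py_alt
  by_cases hv : val = ""
  · simp [hv]
  · simp only [hv, if_false]
    rw [pickLoop_eq_find?, find?_sorted_rev_eq_max?_filter]
    rcases h : PySem.List.max? ((PySem.Dict.ofList catalogue).keys.filter
        (fun k => PySem.Str.isIn k (PySem.Str.strip (PySem.Str.lower val)) ||
                  PySem.Str.isIn (PySem.Str.strip (PySem.Str.lower val)) k)) PySem.Str.len with _ | m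
    · rw [(PySem.List.max?_eq_none_iff _ _).mp h]
      simp
    · rw [isEmpty_eq_false_of_max?_eq_some h]
      simp
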